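-- pv_equiv track=rewrite | github.com/DouglasThompson76/market | _legacy/marketinfrastructure/html_views.py | iter_ordered_checks
-- ===== SOURCE A (Python) =====
-- from typing import Any
--
-- def iter_ordered_checks(checks: dict[str, dict[str, Any]]) -> list[tuple[str, dict[str, Any]]]:
--     order = (
--         "gnn_support",
--         "pink_line_context",
--         "squeeze_context",
--         "blue_sky_context",
--         "narrative_context",
--         "pattern_context",
--         "relative_volume_context",
--         "risk_context",
--     )
--     known = [(name, checks[name]) for name in order if name in checks]
--     extras = [(name, payload) for name, payload in checks.items() if name not in order]
--     return known + extras
-- ===== SOURCE B (Python) =====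
-- def iter_ordered_checks(checks):
--     order = (
--         "gnn_support",
--         "pink_line_context",
--         "squeeze_context",
--         "blue_sky_context",
--         "narrative_context",
--         "pattern_context",
--         "relative_volume_context",
--         "risk_context",
--     )
--     priority = {name: i for i, name in enumerate(order)}
--     buckets = [[] for _ in range(len(order) + 1)]
--     for name, payload in checks.items():
--         buckets[priority.get(name, len(order))].append((name, payload))
--     return [pair for bucket in buckets for pair in bucket]
-- ===== Notes on version B (the rewrite author's own statement) =====
-- stated objective: alternative
-- what changed: A makes one lookup pass per known name plus a second extras scan; B builds a priority index once and makes a single pass over the dict, dropping each item into one of len(order)+1 buckets and concatenating them.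
import Mathlib
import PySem

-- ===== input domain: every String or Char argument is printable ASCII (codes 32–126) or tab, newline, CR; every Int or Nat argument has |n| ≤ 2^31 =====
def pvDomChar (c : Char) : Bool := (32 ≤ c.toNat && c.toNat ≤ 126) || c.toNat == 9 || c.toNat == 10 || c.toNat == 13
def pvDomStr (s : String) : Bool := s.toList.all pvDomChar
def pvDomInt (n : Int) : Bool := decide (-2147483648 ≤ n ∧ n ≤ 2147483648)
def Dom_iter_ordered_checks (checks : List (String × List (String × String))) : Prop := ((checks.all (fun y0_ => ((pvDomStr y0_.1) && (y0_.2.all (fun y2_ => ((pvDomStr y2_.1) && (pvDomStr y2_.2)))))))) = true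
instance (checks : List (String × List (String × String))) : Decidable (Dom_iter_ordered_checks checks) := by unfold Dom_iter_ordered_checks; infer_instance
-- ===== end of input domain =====

-- B replaces A's two filtering passes (one lookup per known name, then an extras scan) by a single
-- pass that drops each item into a priority bucket and concatenates the buckets (objective: alternative).

-- ===== PORT A =====
def iter_ordered_checks (checks : List (String × List (String × String))) : List (String × (List (String × String))) :=
  let order : List String :=
    ["gnn_support", "pink_line_context", "squeeze_context", "blue_sky_context",
     "narrative_context", "pattern_context", "relative_volume_context", "risk_context"]
  -- [(name, checks[name]) for name in order if name in checks] ; checks[name] is guarded, so getD is never the default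
  let known := (order.filter (fun name => (List.lookup name checks).isSome)).map
      (fun name => (name, (List.lookup name checks).getD []))
  -- [(name, payload) for name, payload in checks.items() if name not in order]
  let extras := checks.filter (fun kv => !(order.contains kv.1))
  known ++ extras

-- ===== PORT B =====
def iter_ordered_checks_alt (checks : List (String × List (String × String))) : List (String × (List (String × String))) :=
  let order : List String :=
    ["gnn_support", "pink_line_context", "squeeze_context", "blue_sky_context",
     "narrative_context", "pattern_context", "relative_volume_context", "risk_context"]
  -- priority = {name: i for i, name in enumerate(order)}
  let priority : PySem.Dict String Int :=
    PySem.Dict.ofList ((PySem.List.enumerate order 0).map (fun p => (p.2, p.1)))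
  -- buckets = [[] for _ in range(len(order)+1)]; for name, payload in checks.items(): buckets[...].append(...)
  -- the bucket index priority.get(name, len(order)) is always in 0..len(order), so .toNat is exact
  let buckets := checks.foldl
      (fun bs kv => bs.modify (PySem.Dict.getD priority kv.1 (order.length : Int)).toNat (fun b => b ++ [kv]))
      (List.replicate (order.length + 1) ([] : List (String × List (String × String))))
  -- [pair for bucket in buckets for pair in bucket]
  buckets.flatten

-- ===== PRECONDITION & SPEC =====
-- Pre_ requires pairwise-distinct keys: the Python argument is a dict, so an association list with a
-- duplicated key represents no input the Python function can receive.
def Pre_iter_ordered_checks (checks : List (String × List (String × String))) : Prop :=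
  (checks.map (fun kv => kv.1)).Nodup
instance (checks : List (String × List (String × String))) : Decidable (Pre_iter_ordered_checks checks) := by
  unfold Pre_iter_ordered_checks; infer_instance

def pvWitness_iter_ordered_checks : (List (String × List (String × String))) :=
  [("risk_context", [("status", "ok")]), ("zz", []), ("gnn_support", [("a", "1")])]

def Spec_iter_ordered_checks (checks : List (String × List (String × String))) (out : List (String × (List (String × String)))) : Prop := out = iter_ordered_checks_alt checks
instance (checks : List (String × List (String × String))) (out : List (String × (List (String × String)))) : Decidable (Spec_iter_ordered_checks checks out) := by unfold Spec_iter_ordered_checks; infer_instance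

-- ===== CLAIM (what is proved, stated in full; the proofs are below) =====
def Claim_equal_iter_ordered_checks : Prop := ∀ (checks : List (String × List (String × String))), Dom_iter_ordered_checks checks → Pre_iter_ordered_checks checks → Spec_iter_ordered_checks checks (iter_ordered_checks checks)

-- ===== LEMMAS AND PROOFS =====

def pvOrder : List String :=
  ["gnn_support", "pink_line_context", "squeeze_context", "blue_sky_context",
   "narrative_context", "pattern_context", "relative_volume_context", "risk_context"]

-- the bucket index B computes for a key
def pvIdx (s : String) : Nat :=
  (PySem.Dict.getD
    (PySem.Dict.ofList ((PySem.List.enumerate pvOrder 0).map (fun p => (p.2, p.1))))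
    s (pvOrder.length : Int)).toNat

lemma pvAlt_eq (checks : List (String × List (String × String))) :
    iter_ordered_checks_alt checks
      = (checks.foldl (fun bs kv => bs.modify (pvIdx kv.1) (fun b => b ++ [kv]))
          (List.replicate (pvOrder.length + 1) [])).flatten := rfl

set_option maxHeartbeats 4000000 in
lemma pvIdx_cases (s : String) :
    pvIdx s =
      if "gnn_support" = s then 0 else if "pink_line_context" = s then 1 else
      if "squeeze_context" = s then 2 else if "blue_sky_context" = s then 3 else
      if "narrative_context" = s then 4 else if "pattern_context" = s then 5 else
      if "relative_volume_context" = s then 6 else if "risk_context" = s then 7 else 8 := by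
  have h : (PySem.Dict.ofList ((PySem.List.enumerate pvOrder 0).map (fun p => (p.2, p.1))))
      = PySem.Dict.mk [("gnn_support", (0 : Int)), ("pink_line_context", 1), ("squeeze_context", 2),
          ("blue_sky_context", 3), ("narrative_context", 4), ("pattern_context", 5),
          ("relative_volume_context", 6), ("risk_context", 7)] := by rfl
  unfold pvIdx
  rw [h]
  simp [PySem.Dict.getD, PySem.Dict.get?_mk_cons]
  split_ifs <;> rfl

-- one pass over cs into buckets = each bucket holds its filter of cs
lemma pvMapIdx_id {α : Type} (g : Nat → α → α) (hg : ∀ i b, g i b = b)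
    (bs : List α) : List.mapIdx g bs = bs := by
  induction bs generalizing g with
  | nil => rfl
  | cons b t ih => simp [List.mapIdx_cons, hg, ih (fun i => g (i + 1)) (fun i => hg (i + 1))]

lemma pvBucketize (f : String → Nat) (cs : List (String × List (String × String)))
    (bs : List (List (String × List (String × String)))) :
    cs.foldl (fun bs kv => bs.modify (f kv.1) (fun b => b ++ [kv])) bs
      = bs.mapIdx (fun j b => b ++ cs.filter (fun kv => f kv.1 == j)) := by
  induction cs generalizing bs with
  | nil => simp [pvMapIdx_id]
  | cons kv t ih =>
    simp only [List.foldl_cons, ih, List.filter_cons]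
    apply List.ext_getElem
    · simp
    · intro j h1 h2
      simp only [List.getElem_mapIdx, List.getElem_modify]
      by_cases hj : f kv.1 = j
      · simp [hj]
      · simp [hj, Ne.symm hj]

-- with distinct keys, the filter of cs at one key is exactly the looked-up pair (or nothing)
lemma pvFilter_key (cs : List (String × List (String × String)))
    (h : (cs.map (fun kv => kv.1)).Nodup) (n : String) :
    cs.filter (fun kv => kv.1 == n)
      = ((List.lookup n cs).map (fun v => (n, v))).toList := by
  induction cs with
  | nil => rfl
  | cons kv t ih =>
    obtain ⟨k, v⟩ := kv
    simp only [List.map_cons, List.nodup_cons] at h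
    by_cases hk : k = n
    · subst hk
      have ht : List.filter (fun kv' => kv'.1 == k) t = [] := by
        rw [List.filter_eq_nil_iff]
        intro x hx hbx
        have hx1 : x.1 = k := by simpa using hbx
        have hm : x.1 ∈ List.map (fun kv => kv.1) t := List.mem_map_of_mem hx
        rw [hx1] at hm
        exact absurd hm h.1
      simp [List.filter_cons, List.lookup, ht]
    · have h1 : (k == n) = false := by simpa using hk
      have h2 : (n == k) = false := by simpa using (Ne.symm hk)
      simp [List.filter_cons, List.lookup, h1, h2, ih h.2]

-- A's "known" pass equals the concatenation of per-name filters
lemma pvKnown_eq (cs : List (String × List (String × String)))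
    (h : (cs.map (fun kv => kv.1)).Nodup) (ord : List String) :
    (ord.filter (fun name => (List.lookup name cs).isSome)).map
        (fun name => (name, (List.lookup name cs).getD []))
      = (ord.map (fun n => cs.filter (fun kv => kv.1 == n))).flatten := by
  induction ord with
  | nil => rfl
  | cons n t ih =>
    simp only [List.filter_cons, List.map_cons, List.flatten_cons, pvFilter_key cs h n]
    cases hl : List.lookup n cs with
    | none => simpa [hl] using ih
    | some v => simpa [hl] using congrArg (fun l => (n, v) :: l) ih

lemma pvE0 (checks : List (String × List (String × String))) :
    checks.filter (fun kv => pvIdx kv.1 == 0) = checks.filter (fun kv => kv.1 == "gnn_support") := by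
  apply List.filter_congr
  intro kv _
  rw [pvIdx_cases kv.1]
  split_ifs with h0 h1 h2 h3 h4 h5 h6 h7
  · rw [← h0]; decide
  · rw [← h1]; decide
  · rw [← h2]; decide
  · rw [← h3]; decide
  · rw [← h4]; decide
  · rw [← h5]; decide
  · rw [← h6]; decide
  · rw [← h7]; decide
  · have hne : (kv.1 == "gnn_support") = false := beq_eq_false_iff_ne.mpr (fun hh => h0 hh.symm)
    rw [hne]; decide

lemma pvE1 (checks : List (String × List (String × String))) :
    checks.filter (fun kv => pvIdx kv.1 == 1) = checks.filter (fun kv => kv.1 == "pink_line_context") := by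
  apply List.filter_congr
  intro kv _
  rw [pvIdx_cases kv.1]
  split_ifs with h0 h1 h2 h3 h4 h5 h6 h7
  · rw [← h0]; decide
  · rw [← h1]; decide
  · rw [← h2]; decide
  · rw [← h3]; decide
  · rw [← h4]; decide
  · rw [← h5]; decide
  · rw [← h6]; decide
  · rw [← h7]; decide
  · have hne : (kv.1 == "pink_line_context") = false := beq_eq_false_iff_ne.mpr (fun hh => h1 hh.symm)
    rw [hne]; decide

lemma pvE2 (checks : List (String × List (String × String))) :
    checks.filter (fun kv => pvIdx kv.1 == 2) = checks.filter (fun kv => kv.1 == "squeeze_context") := by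
  apply List.filter_congr
  intro kv _
  rw [pvIdx_cases kv.1]
  split_ifs with h0 h1 h2 h3 h4 h5 h6 h7
  · rw [← h0]; decide
  · rw [← h1]; decide
  · rw [← h2]; decide
  · rw [← h3]; decide
  · rw [← h4]; decide
  · rw [← h5]; decide
  · rw [← h6]; decide
  · rw [← h7]; decide
  · have hne : (kv.1 == "squeeze_context") = false := beq_eq_false_iff_ne.mpr (fun hh => h2 hh.symm)
    rw [hne]; decide

lemma pvE3 (checks : List (String × List (String × String))) :
    checks.filter (fun kv => pvIdx kv.1 == 3) = checks.filter (fun kv => kv.1 == "blue_sky_context") := by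
  apply List.filter_congr
  intro kv _
  rw [pvIdx_cases kv.1]
  split_ifs with h0 h1 h2 h3 h4 h5 h6 h7
  · rw [← h0]; decide
  · rw [← h1]; decide
  · rw [← h2]; decide
  · rw [← h3]; decide
  · rw [← h4]; decide
  · rw [← h5]; decide
  · rw [← h6]; decide
  · rw [← h7]; decide
  · have hne : (kv.1 == "blue_sky_context") = false := beq_eq_false_iff_ne.mpr (fun hh => h3 hh.symm)
    rw [hne]; decide

lemma pvE4 (checks : List (String × List (String × String))) :
    checks.filter (fun kv => pvIdx kv.1 == 4) = checks.filter (fun kv => kv.1 == "narrative_context") := by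
  apply List.filter_congr
  intro kv _
  rw [pvIdx_cases kv.1]
  split_ifs with h0 h1 h2 h3 h4 h5 h6 h7
  · rw [← h0]; decide
  · rw [← h1]; decide
  · rw [← h2]; decide
  · rw [← h3]; decide
  · rw [← h4]; decide
  · rw [← h5]; decide
  · rw [← h6]; decide
  · rw [← h7]; decide
  · have hne : (kv.1 == "narrative_context") = false := beq_eq_false_iff_ne.mpr (fun hh => h4 hh.symm)
    rw [hne]; decide

lemma pvE5 (checks : List (String × List (String × String))) :
    checks.filter (fun kv => pvIdx kv.1 == 5) = checks.filter (fun kv => kv.1 == "pattern_context") := by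
  apply List.filter_congr
  intro kv _
  rw [pvIdx_cases kv.1]
  split_ifs with h0 h1 h2 h3 h4 h5 h6 h7
  · rw [← h0]; decide
  · rw [← h1]; decide
  · rw [← h2]; decide
  · rw [← h3]; decide
  · rw [← h4]; decide
  · rw [← h5]; decide
  · rw [← h6]; decide
  · rw [← h7]; decide
  · have hne : (kv.1 == "pattern_context") = false := beq_eq_false_iff_ne.mpr (fun hh => h5 hh.symm)
    rw [hne]; decide

lemma pvE6 (checks : List (String × List (String × String))) :
    checks.filter (fun kv => pvIdx kv.1 == 6) = checks.filter (fun kv => kv.1 == "relative_volume_context") := by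
  apply List.filter_congr
  intro kv _
  rw [pvIdx_cases kv.1]
  split_ifs with h0 h1 h2 h3 h4 h5 h6 h7
  · rw [← h0]; decide
  · rw [← h1]; decide
  · rw [← h2]; decide
  · rw [← h3]; decide
  · rw [← h4]; decide
  · rw [← h5]; decide
  · rw [← h6]; decide
  · rw [← h7]; decide
  · have hne : (kv.1 == "relative_volume_context") = false := beq_eq_false_iff_ne.mpr (fun hh => h6 hh.symm)
    rw [hne]; decide

lemma pvE7 (checks : List (String × List (String × String))) :
    checks.filter (fun kv => pvIdx kv.1 == 7) = checks.filter (fun kv => kv.1 == "risk_context") := by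
  apply List.filter_congr
  intro kv _
  rw [pvIdx_cases kv.1]
  split_ifs with h0 h1 h2 h3 h4 h5 h6 h7
  · rw [← h0]; decide
  · rw [← h1]; decide
  · rw [← h2]; decide
  · rw [← h3]; decide
  · rw [← h4]; decide
  · rw [← h5]; decide
  · rw [← h6]; decide
  · rw [← h7]; decide
  · have hne : (kv.1 == "risk_context") = false := beq_eq_false_iff_ne.mpr (fun hh => h7 hh.symm)
    rw [hne]; decide

lemma pvE8 (checks : List (String × List (String × String))) :
    checks.filter (fun kv => pvIdx kv.1 == 8)
      = checks.filter (fun kv => !(List.contains ["gnn_support", "pink_line_context", "squeeze_context", "blue_sky_context", "narrative_context", "pattern_context", "relative_volume_context", "risk_context"] kv.1)) := by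
  apply List.filter_congr
  intro kv _
  rw [pvIdx_cases kv.1]
  split_ifs with h0 h1 h2 h3 h4 h5 h6 h7
  · rw [← h0]; decide
  · rw [← h1]; decide
  · rw [← h2]; decide
  · rw [← h3]; decide
  · rw [← h4]; decide
  · rw [← h5]; decide
  · rw [← h6]; decide
  · rw [← h7]; decide
  · have c : kv.1 ∉ ["gnn_support", "pink_line_context", "squeeze_context", "blue_sky_context", "narrative_context", "pattern_context", "relative_volume_context", "risk_context"] := by
      simp only [List.mem_cons, List.not_mem_nil, or_false]
      rintro (h | h | h | h | h | h | h | h)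
      · exact h0 h.symm
      · exact h1 h.symm
      · exact h2 h.symm
      · exact h3 h.symm
      · exact h4 h.symm
      · exact h5 h.symm
      · exact h6 h.symm
      · exact h7 h.symm
    simp [c]

-- ===== VERDICT (by name: the statement is the Claim_ definition above) =====
theorem iter_ordered_checks_spec : Claim_equal_iter_ordered_checks := by
  intro checks _ hpre
  unfold Spec_iter_ordered_checks
  rw [pvAlt_eq, pvBucketize pvIdx checks]
  have hrep : List.replicate (pvOrder.length + 1) ([] : List (String × List (String × String)))
      = [[], [], [], [], [], [], [], [], []] := rfl
  rw [hrep]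
  have hmap : List.mapIdx (fun j b => b ++ checks.filter (fun kv => pvIdx kv.1 == j))
      ([[], [], [], [], [], [], [], [], []] : List (List (String × List (String × String))))
      = [checks.filter (fun kv => pvIdx kv.1 == 0),
        checks.filter (fun kv => pvIdx kv.1 == 1),
        checks.filter (fun kv => pvIdx kv.1 == 2),
        checks.filter (fun kv => pvIdx kv.1 == 3),
        checks.filter (fun kv => pvIdx kv.1 == 4),
        checks.filter (fun kv => pvIdx kv.1 == 5),
        checks.filter (fun kv => pvIdx kv.1 == 6),
        checks.filter (fun kv => pvIdx kv.1 == 7),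
        checks.filter (fun kv => pvIdx kv.1 == 8)] := rfl
  rw [hmap]
  unfold iter_ordered_checks
  simp only []
  rw [pvKnown_eq checks hpre]
  simp only [List.map_cons, List.map_nil, List.flatten_cons, List.flatten_nil]
  rw [pvE0 checks, pvE1 checks, pvE2 checks, pvE3 checks, pvE4 checks, pvE5 checks,
      pvE6 checks, pvE7 checks, pvE8 checks]
  simp [List.append_assoc]
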